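-- pv_equiv track=rewrite | github.com/dung7athcsht11/NLP | NLPSEGMENT/utils/metrics.py | count_correct_words
-- ===== SOURCE A (Python) =====
-- def count_correct_words(pred_sentences, gold_sentences):
--     total_correct = 0
--     total_gold = 0
--     total_pred = 0
--
--     for pred, gold in zip(pred_sentences, gold_sentences):
--         p_list = list(pred)
--         g_list = list(gold)
--         total_pred += len(p_list)
--         total_gold += len(g_list)
--         gold_counts = {}
--         for w in g_list:
--             gold_counts[w] = gold_counts.get(w, 0) + 1
--         for w in p_list:
--             if w in gold_counts and gold_counts[w] > 0:
--                 total_correct += 1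
--                 gold_counts[w] -= 1
--     return total_correct, total_gold, total_pred
-- ===== SOURCE B (Python) =====
-- def count_correct_words(pred_sentences, gold_sentences):
--     total_correct = 0
--     total_gold = 0
--     total_pred = 0
--     for pred, gold in zip(pred_sentences, gold_sentences):
--         p_list = list(pred)
--         g_list = list(gold)
--         total_pred += len(p_list)
--         total_gold += len(g_list)
--         total_correct += sum(min(p_list.count(w), g_list.count(w)) for w in set(p_list))
--     return total_correct, total_gold, total_pred
-- ===== Notes on version B (the rewrite author's own statement) =====
-- stated objective: simpler
-- what changed: The live decrementing gold-count dictionary and the per-word scan of pred are replaced by a direct multiset-intersection formula: per sentence the correct count is sum of min(pred.count(w), gold.count(w)) over the distinct words of pred.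
import Mathlib
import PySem

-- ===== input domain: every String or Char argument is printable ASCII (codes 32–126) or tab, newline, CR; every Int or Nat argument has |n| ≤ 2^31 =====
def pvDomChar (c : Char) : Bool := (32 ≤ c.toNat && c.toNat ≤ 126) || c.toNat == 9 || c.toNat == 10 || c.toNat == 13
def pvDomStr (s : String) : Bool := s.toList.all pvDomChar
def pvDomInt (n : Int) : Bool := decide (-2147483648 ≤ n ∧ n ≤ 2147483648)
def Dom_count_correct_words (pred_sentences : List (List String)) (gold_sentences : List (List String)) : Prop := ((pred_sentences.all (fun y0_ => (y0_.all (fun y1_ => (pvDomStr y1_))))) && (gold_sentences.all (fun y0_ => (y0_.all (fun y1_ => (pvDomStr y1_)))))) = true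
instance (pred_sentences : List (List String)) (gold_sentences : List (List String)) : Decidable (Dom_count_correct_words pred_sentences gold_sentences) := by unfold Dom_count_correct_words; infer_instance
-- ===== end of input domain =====

-- B replaces A's live decrementing gold-count dictionary and its word-by-word scan of pred by the
-- closed multiset-intersection formula sum(min(p.count(w), g.count(w)) for w in set(p)) per sentence; simpler, not faster.

-- ===== PORT A =====
-- A's inner 'for w in p_list' pass, threading (total_correct, gold_counts)
def ccwPredLoop (p : List String) (s0 : Int × PySem.Dict String Int) : Int × PySem.Dict String Int :=
  p.foldl (fun s w =>
    if s.2.contains w && decide (0 < s.2.getD w 0) then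
      (s.1 + 1, s.2.insert w (s.2.getD w 0 - 1))
    else s) s0

def count_correct_words (pred_sentences : List (List String)) (gold_sentences : List (List String)) : Int × Int × Int :=
  (pred_sentences.zip gold_sentences).foldl
    (fun acc pg =>
      let p_list := pg.1
      let g_list := pg.2
      let total_pred := acc.2.2 + (p_list.length : Int)
      let total_gold := acc.2.1 + (g_list.length : Int)
      let gold_counts := g_list.foldl (fun d w => d.insert w (d.getD w 0 + 1)) PySem.Dict.empty
      let inner := ccwPredLoop p_list (acc.1, gold_counts)
      (inner.1, total_gold, total_pred))
    (0, 0, 0)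

-- ===== PORT B =====
def count_correct_words_alt (pred_sentences : List (List String)) (gold_sentences : List (List String)) : Int × Int × Int :=
  (pred_sentences.zip gold_sentences).foldl
    (fun acc pg =>
      let p_list := pg.1
      let g_list := pg.2
      (acc.1 + ((PySem.Set.ofList p_list).map
          (fun w => min (p_list.count w : Int) (g_list.count w : Int))).sum,
       acc.2.1 + (g_list.length : Int),
       acc.2.2 + (p_list.length : Int)))
    (0, 0, 0)

-- ===== PRECONDITION & SPEC =====
def Spec_count_correct_words (pred_sentences : List (List String)) (gold_sentences : List (List String)) (out : Int × Int × Int) : Prop := out = count_correct_words_alt pred_sentences gold_sentences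
instance (pred_sentences : List (List String)) (gold_sentences : List (List String)) (out : Int × Int × Int) : Decidable (Spec_count_correct_words pred_sentences gold_sentences out) := by unfold Spec_count_correct_words; infer_instance

-- ===== CLAIM (what is proved, stated in full; the proofs are below) =====
def Claim_equal_count_correct_words : Prop := ∀ (pred_sentences : List (List String)) (gold_sentences : List (List String)), Dom_count_correct_words pred_sentences gold_sentences → Spec_count_correct_words pred_sentences gold_sentences (count_correct_words pred_sentences gold_sentences)

-- ===== LEMMAS AND PROOFS =====

-- A's loop condition "w in gold_counts and gold_counts[w] > 0" reduces to "0 < getD w 0"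
lemma ccw_cond_eq (d : PySem.Dict String Int) (w : String) :
    (d.contains w && decide (0 < d.getD w 0)) = decide (0 < d.getD w 0) := by
  cases h : d.contains w with
  | true => simp
  | false =>
      have hn : d.get? w = none := by
        have hc := PySem.Dict.contains_eq_isSome_get? d w
        rw [h] at hc
        exact Option.not_isSome_iff_eq_none.mp (by simp [← hc])
      simp [PySem.Dict.getD, hn]

-- loop invariant: if the dict holds the counts of the multiset r, the pred loop adds |↑p ∩ r|
lemma ccwPredLoop_inv (p : List String) :
    ∀ (d : PySem.Dict String Int) (c : Int) (r : Multiset String),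
      (∀ w, d.getD w 0 = (r.count w : Int)) →
      (ccwPredLoop p (c, d)).1 = c + (((p : Multiset String) ∩ r).card : Int) := by
  induction p with
  | nil => intro d c r h; simp [ccwPredLoop]
  | cons w p ih =>
      intro d c r h
      have hcond : (d.contains w && decide (0 < d.getD w 0)) = decide (w ∈ r) := by
        rw [ccw_cond_eq]
        by_cases hm : w ∈ r
        · simp [hm, h w, Multiset.count_pos.mpr hm]
        · simp [hm, h w]
      unfold ccwPredLoop
      simp only [List.foldl_cons]
      rw [hcond]
      by_cases hm : w ∈ r
      · simp only [hm, decide_true, if_true]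
        have := ih (d.insert w (d.getD w 0 - 1)) (c + 1) (r.erase w) ?_
        · unfold ccwPredLoop at this
          rw [this]
          rw [show ((w :: p : List String) : Multiset String) = w ::ₘ (p : Multiset String) from rfl]
          rw [Multiset.cons_inter_of_pos _ hm]
          push_cast [Multiset.card_cons]
          ring
        · intro u
          by_cases hu : u = w
          · subst hu
            rw [PySem.Dict.getD_insert, if_pos rfl]
            rw [h u, Multiset.count_erase_self]
            have := Multiset.count_pos.mpr hm
            omega
          · rw [PySem.Dict.getD_insert, if_neg (fun e => hu e)]
            rw [h u, Multiset.count_erase_of_ne hu]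
      · simp only [hm, decide_false, Bool.false_eq_true, if_false]
        have := ih d c r h
        unfold ccwPredLoop at this
        rw [this]
        rw [show ((w :: p : List String) : Multiset String) = w ::ₘ (p : Multiset String) from rfl]
        rw [Multiset.cons_inter_of_neg _ hm]

-- |↑p ∩ ↑g| equals B's per-sentence sum of min counts over the distinct words of p
lemma card_inter_eq (p g : List String) :
    ((((p : Multiset String) ∩ (g : Multiset String)).card : Int)) =
      ((PySem.Set.ofList p).map (fun w => min (p.count w : Int) (g.count w : Int))).sum := by
  have hsub : ((p : Multiset String) ∩ (g : Multiset String)).toFinset ⊆ p.toFinset := by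
    intro a ha
    rw [Multiset.mem_toFinset] at ha
    rw [List.mem_toFinset, ← Multiset.mem_coe]
    exact Multiset.mem_of_le Multiset.inter_le_left ha
  have h1 : (((p : Multiset String) ∩ (g : Multiset String)).card) =
      ∑ a ∈ p.toFinset, min (p.count a) (g.count a) := by
    rw [← Multiset.toFinset_sum_count_eq]
    rw [Finset.sum_congr rfl (fun a _ => by
      rw [Multiset.count_inter, Multiset.coe_count, Multiset.coe_count])]
    refine Finset.sum_subset hsub ?_
    intro a _ ha
    rw [Multiset.mem_toFinset] at ha
    have h0 : Multiset.count a ((p : Multiset String) ∩ (g : Multiset String)) = 0 :=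
      Multiset.count_eq_zero.mpr ha
    rw [Multiset.count_inter] at h0
    simpa using h0
  have h2 : (PySem.Set.ofList p).toFinset = p.toFinset := by
    apply Finset.ext
    intro a
    simp [List.mem_toFinset, PySem.Set.mem_ofList]
  have h3 : ((PySem.Set.ofList p).map (fun w => min (p.count w : Int) (g.count w : Int))).sum =
      ∑ a ∈ p.toFinset, min (p.count a : Int) (g.count a : Int) := by
    rw [← h2, ← List.sum_toFinset _ (PySem.Set.nodup_ofList p)]
  rw [h1, h3]
  push_cast
  rfl

-- the two per-sentence step functions agree on every accumulator and pair
lemma ccw_step_eq (acc : Int × Int × Int) (pg : List String × List String) :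
    (((ccwPredLoop pg.1 (acc.1, pg.2.foldl (fun d w => d.insert w (d.getD w 0 + 1)) PySem.Dict.empty)).1,
       acc.2.1 + (pg.2.length : Int), acc.2.2 + (pg.1.length : Int)) : Int × Int × Int) =
    (acc.1 + ((PySem.Set.ofList pg.1).map
        (fun w => min (pg.1.count w : Int) (pg.2.count w : Int))).sum,
     acc.2.1 + (pg.2.length : Int), acc.2.2 + (pg.1.length : Int)) := by
  have hcnt : ∀ w, (pg.2.foldl (fun d w => d.insert w (d.getD w 0 + 1)) PySem.Dict.empty).getD w 0
      = ((pg.2 : Multiset String).count w : Int) := by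
    intro w
    rw [PySem.Dict.foldl_insert_getD_add_one_eq_counter, PySem.Dict.getD_counter,
      Multiset.coe_count]
  have h := ccwPredLoop_inv pg.1
    (pg.2.foldl (fun d w => d.insert w (d.getD w 0 + 1)) PySem.Dict.empty)
    acc.1 (pg.2 : Multiset String) hcnt
  rw [h, card_inter_eq]

-- both folds over the zipped list agree from any accumulator
lemma ccw_foldl_eq (l : List (List String × List String)) :
    ∀ acc : Int × Int × Int,
      l.foldl (fun acc pg =>
        ((ccwPredLoop pg.1 (acc.1, pg.2.foldl (fun d w => d.insert w (d.getD w 0 + 1)) PySem.Dict.empty)).1,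
         acc.2.1 + (pg.2.length : Int), acc.2.2 + (pg.1.length : Int))) acc =
      l.foldl (fun acc pg =>
        (acc.1 + ((PySem.Set.ofList pg.1).map
            (fun w => min (pg.1.count w : Int) (pg.2.count w : Int))).sum,
         acc.2.1 + (pg.2.length : Int), acc.2.2 + (pg.1.length : Int))) acc := by
  induction l with
  | nil => intro acc; rfl
  | cons pg l ih =>
      intro acc
      simp only [List.foldl_cons]
      rw [ccw_step_eq]
      exact ih _

-- ===== VERDICT (by name: the statement is the Claim_ definition above) =====
theorem count_correct_words_spec : Claim_equal_count_correct_words := by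
  intro ps gs _
  unfold Spec_count_correct_words count_correct_words count_correct_words_alt
  exact ccw_foldl_eq (ps.zip gs) (0, 0, 0)
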